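-- pv_equiv track=rewrite | github.com/redchupa/youtube_monitoring_addon | youtube_monitoring/app/history_store.py | get_monthly_breakdown
-- ===== SOURCE A (Python) =====
-- from typing import Any
--
-- def _is_shorts(entry: dict[str, Any]) -> bool:
--     """Shorts 여부: duration 또는 channel로 판별."""
--     return (
--         entry.get("duration") == "Shorts"
--         or entry.get("channel") == "YouTube Shorts"
--     )
--
-- def get_monthly_breakdown(
--     history: dict[str, list[dict[str, Any]]]
-- ) -> dict[str, dict[str, int]]:
--     """월별 동영상/쇼츠 구분. { "YYYY-MM": {"videos": n, "shorts": n} } 최신순."""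
--     monthly: dict[str, dict[str, int]] = {}
--     for date_str, entries in history.items():
--         if len(date_str) < 7:
--             continue
--         month = date_str[:7]
--         if month not in monthly:
--             monthly[month] = {"videos": 0, "shorts": 0}
--         for e in entries:
--             if _is_shorts(e):
--                 monthly[month]["shorts"] += 1
--             else:
--                 monthly[month]["videos"] += 1
--     return dict(sorted(monthly.items(), reverse=True))
-- ===== SOURCE B (Python) =====
-- from typing import Any
--
--
-- def _is_shorts(entry: dict[str, Any]) -> bool:
--     return (
--         entry.get("duration") == "Shorts"
--         or entry.get("channel") == "YouTube Shorts"
--     )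
--
--
-- def get_monthly_breakdown(
--     history: dict[str, list[dict[str, Any]]]
-- ) -> dict[str, dict[str, int]]:
--     """Collect the distinct months up front, sort them newest-first once,
--     then compute each month's totals by a scan over the history."""
--     months = sorted({d[:7] for d in history if len(d) >= 7}, reverse=True)
--     result: dict[str, dict[str, int]] = {}
--     for m in months:
--         videos = 0
--         shorts = 0
--         for d, entries in history.items():
--             if len(d) >= 7 and d[:7] == m:
--                 s = sum(1 for e in entries if _is_shorts(e))
--                 shorts += s
--                 videos += len(entries) - s
--         result[m] = {"videos": videos, "shorts": shorts}
--     return result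
-- ===== Notes on version B (the rewrite author's own statement) =====
-- stated objective: alternative
-- what changed: Instead of aggregating into a dict of counters while scanning and sorting the finished dict at the end, B first collects the distinct month prefixes as a set, sorts them newest-first once, and then computes each month's videos/shorts totals by a per-month recount over the history (sum of a predicate plus a length difference, no mutable nested counters).
import Mathlib
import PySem

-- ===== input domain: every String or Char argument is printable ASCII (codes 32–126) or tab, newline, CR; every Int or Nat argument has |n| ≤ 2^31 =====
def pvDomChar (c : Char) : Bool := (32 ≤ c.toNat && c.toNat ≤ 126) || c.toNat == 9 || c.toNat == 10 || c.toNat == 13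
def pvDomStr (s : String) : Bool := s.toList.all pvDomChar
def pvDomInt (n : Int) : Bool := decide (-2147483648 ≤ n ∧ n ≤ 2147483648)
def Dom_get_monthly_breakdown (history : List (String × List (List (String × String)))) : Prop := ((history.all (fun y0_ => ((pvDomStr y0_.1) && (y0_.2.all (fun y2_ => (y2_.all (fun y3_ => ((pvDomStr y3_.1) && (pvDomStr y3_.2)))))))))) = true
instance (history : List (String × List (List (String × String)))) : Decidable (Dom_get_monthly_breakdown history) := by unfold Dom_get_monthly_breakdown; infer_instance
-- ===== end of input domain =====

-- B replaces A's scan-while-counting-into-nested-dicts-then-sort with: sort the distinct months once, then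
-- recount each month's totals by a scan over the history (objective: alternative decomposition, not faster).

-- helpers shared by both ports (each Python file defines the same _is_shorts)
def pvIsShorts (e : List (String × String)) : Bool :=
  ((PySem.Dict.mk e).get? "duration" == some "Shorts") ||
  ((PySem.Dict.mk e).get? "channel" == some "YouTube Shorts")

-- date_str[:7]
def pvMonth (d : String) : String := PySem.Str.slice d none (some 7)

-- ===== PORT A =====
def pvAStep (monthly : PySem.Dict String (PySem.Dict String Int))
    (p : String × List (List (String × String))) : PySem.Dict String (PySem.Dict String Int) :=
  if PySem.Str.len p.1 < 7 then monthly
  else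
    let month := pvMonth p.1
    let monthly1 := if monthly.contains month then monthly
      else monthly.insert month (PySem.Dict.mk [("videos", (0 : Int)), ("shorts", 0)])
    p.2.foldl (fun mo e =>
      if pvIsShorts e then mo.modify month (PySem.Dict.mk []) (fun c => c.modify "shorts" 0 (· + 1))
      else mo.modify month (PySem.Dict.mk []) (fun c => c.modify "videos" 0 (· + 1))) monthly1

def get_monthly_breakdown (history : List (String × List (List (String × String)))) : List (String × List (String × Int)) :=
  let monthly := history.foldl pvAStep PySem.Dict.empty
  -- sorted(monthly.items(), reverse=True): dict keys are unique, so Python's tuple order here is the key order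
  (PySem.List.sorted monthly.items (fun p => p.1) true).map (fun p => (p.1, p.2.items))

-- ===== PORT B =====
def get_monthly_breakdown_alt (history : List (String × List (List (String × String)))) : List (String × List (String × Int)) :=
  let months := PySem.List.sorted
    (PySem.Set.ofList ((history.filter (fun p => decide (7 ≤ PySem.Str.len p.1))).map (fun p => pvMonth p.1)))
    (fun m => m) true
  let result := months.foldl (fun (result : PySem.Dict String (PySem.Dict String Int)) m =>
    let vs := history.foldl (fun (vs : Int × Int) p =>
      if decide (7 ≤ PySem.Str.len p.1) && (pvMonth p.1 == m) then
        let s : Int := ((p.2.countP pvIsShorts : Nat) : Int)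
        (vs.1 + ((p.2.length : Int) - s), vs.2 + s)
      else vs) ((0 : Int), (0 : Int))
    result.insert m (PySem.Dict.mk [("videos", vs.1), ("shorts", vs.2)])) PySem.Dict.empty
  result.items.map (fun p => (p.1, p.2.items))

-- ===== PRECONDITION & SPEC =====
def Spec_get_monthly_breakdown (history : List (String × List (List (String × String)))) (out : List (String × List (String × Int))) : Prop := out = get_monthly_breakdown_alt history
instance (history : List (String × List (List (String × String)))) (out : List (String × List (String × Int))) : Decidable (Spec_get_monthly_breakdown history out) := by unfold Spec_get_monthly_breakdown; infer_instance

-- ===== CLAIM (what is proved, stated in full; the proofs are below) =====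
def Claim_equal_get_monthly_breakdown : Prop := ∀ (history : List (String × List (List (String × String)))), Dom_get_monthly_breakdown history → Spec_get_monthly_breakdown history (get_monthly_breakdown history)

-- ===== LEMMAS AND PROOFS =====

-- proof-side abbreviations
def pvCond (m : String) (p : String × List (List (String × String))) : Bool :=
  decide (7 ≤ PySem.Str.len p.1) && (pvMonth p.1 == m)
def pvNS (es : List (List (String × String))) : Int := ((es.countP pvIsShorts : Nat) : Int)
def pvNV (es : List (List (String × String))) : Int := ((es.length : Int) - pvNS es)
def pvMonths (h : List (String × List (List (String × String)))) : List String :=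
  (h.filter (fun p => decide (7 ≤ PySem.Str.len p.1))).map (fun p => pvMonth p.1)
def pvS (h : List (String × List (List (String × String)))) (m : String) : Int :=
  ((h.filter (pvCond m)).map (fun p => pvNS p.2)).sum
def pvV (h : List (String × List (List (String × String)))) (m : String) : Int :=
  ((h.filter (pvCond m)).map (fun p => pvNV p.2)).sum
def pvInner (h : List (String × List (List (String × String)))) (m : String) : PySem.Dict String Int :=
  PySem.Dict.mk [("videos", pvV h m), ("shorts", pvS h m)]
def pvCanon (h : List (String × List (List (String × String)))) : List (String × List (String × Int)) :=
  (PySem.List.sorted (PySem.Set.ofList (pvMonths h)) (fun m => m) true).map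
    (fun m => (m, [("videos", pvV h m), ("shorts", pvS h m)]))

theorem pv_ofList_append_singleton (L : List String) (x : String) :
    PySem.Set.ofList (L ++ [x]) = if x ∈ L then PySem.Set.ofList L else PySem.Set.ofList L ++ [x] := by
  have : PySem.Set.ofList (L ++ [x]) = PySem.Set.add (PySem.Set.ofList L) x := by
    simp [PySem.Set.ofList, List.foldl_append]
  rw [this, PySem.Set.add]
  have hc : (PySem.Set.ofList L).contains x = decide (x ∈ L) := by
    by_cases hx : x ∈ L
    · simp [List.contains_iff_mem, hx, (PySem.Set.mem_ofList L x).mpr hx]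
    · have : x ∉ PySem.Set.ofList L := fun hmem => hx ((PySem.Set.mem_ofList L x).mp hmem)
      simp [List.contains_iff_mem, hx, this]
  rw [hc]
  by_cases hx : x ∈ L <;> simp [hx]

theorem pv_insert_self {κ ν : Type} [BEq κ] [LawfulBEq κ] (d : PySem.Dict κ ν) (k : κ) (v : ν)
    (hn : d.keys.Nodup) (hg : d.get? k = some v) : d.insert k v = d := by
  apply PySem.Dict.ext
  rw [PySem.Dict.items_insert_of_contains _ _ (by rw [PySem.Dict.contains_eq_isSome_get?, hg]; rfl)]
  have : ∀ p ∈ d.items, (if p.1 == k then (k, v) else p) = p := by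
    intro p hp
    by_cases hpk : p.1 == k
    · have hk : p.1 = k := by simpa using hpk
      have h2 := PySem.Dict.get?_of_mem_items d (k := p.1) (v := p.2) (by simpa using hp) hn
      rw [hk, hg] at h2
      have hv2 : v = p.2 := Option.some_inj.mp h2
      rw [if_pos hpk, hv2, ← hk]
    · simp [hpk]
  calc List.map (fun p => if p.1 == k then (k, v) else p) d.items
      = List.map id d.items := List.map_congr_left fun p hp => this p hp
    _ = d.items := List.map_id d.items

theorem pv_modify_insert {κ ν : Type} [BEq κ] [LawfulBEq κ] (d : PySem.Dict κ ν) (k : κ) (v d0 : ν) (f : ν → ν) :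
    (d.insert k v).modify k d0 f = d.insert k (f v) := by
  rw [PySem.Dict.modify, PySem.Dict.getD_insert_self, PySem.Dict.insert_insert_self]

theorem pv_istep_foldl (month : String) (es : List (List (String × String)))
    (mo : PySem.Dict String (PySem.Dict String Int)) (v s : Int) :
    es.foldl (fun mo e =>
        if pvIsShorts e then mo.modify month (PySem.Dict.mk []) (fun c => c.modify "shorts" 0 (· + 1))
        else mo.modify month (PySem.Dict.mk []) (fun c => c.modify "videos" 0 (· + 1)))
      (mo.insert month (PySem.Dict.mk [("videos", v), ("shorts", s)]))
    = mo.insert month (PySem.Dict.mk [("videos", v + pvNV es), ("shorts", s + pvNS es)]) := by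
  induction es generalizing v s with
  | nil => simp [pvNV, pvNS]
  | cons e es ih =>
    rw [List.foldl_cons]
    by_cases he : pvIsShorts e
    · rw [if_pos he, pv_modify_insert]
      have : (PySem.Dict.mk [("videos", v), ("shorts", s)]).modify "shorts" 0 (· + 1)
          = PySem.Dict.mk [("videos", v), ("shorts", s + 1)] := rfl
      rw [this, ih]
      have hs : s + 1 + pvNS es = s + pvNS (e :: es) := by
        simp [pvNS, List.countP_cons, he]; push_cast; ring
      have hv : v + pvNV es = v + pvNV (e :: es) := by
        simp [pvNV, pvNS, List.countP_cons, he]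
      rw [hs, hv]
    · rw [if_neg he, pv_modify_insert]
      have : (PySem.Dict.mk [("videos", v), ("shorts", s)]).modify "videos" 0 (· + 1)
          = PySem.Dict.mk [("videos", v + 1), ("shorts", s)] := rfl
      rw [this, ih]
      have hs : s + pvNS es = s + pvNS (e :: es) := by
        simp [pvNS, List.countP_cons, he]
      have hv : v + 1 + pvNV es = v + pvNV (e :: es) := by
        simp [pvNV, pvNS, List.countP_cons, he]; push_cast; ring
      rw [hs, hv]

theorem pv_months_append (h : List (String × List (List (String × String)))) (p : String × List (List (String × String))) :
    pvMonths (h ++ [p]) = pvMonths h ++ (if 7 ≤ PySem.Str.len p.1 then [pvMonth p.1] else []) := by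
  by_cases hp : 7 ≤ PySem.Str.len p.1
  · have hp' : 7 ≤ p.1.length := by rw [PySem.Str.len_eq, String.length_toList] at hp; exact_mod_cast hp
    simp [pvMonths, List.filter_append, hp, hp']
  · have hp' : ¬ 7 ≤ p.1.length := by rw [PySem.Str.len_eq, String.length_toList] at hp; exact_mod_cast hp
    simp [pvMonths, List.filter_append, hp, hp']

theorem pv_V_append (h : List (String × List (List (String × String)))) (p : String × List (List (String × String))) (m : String) :
    pvV (h ++ [p]) m = pvV h m + (if pvCond m p then pvNV p.2 else 0) := by
  by_cases hp : pvCond m p <;> simp [pvV, List.filter_append, hp]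

theorem pv_S_append (h : List (String × List (List (String × String)))) (p : String × List (List (String × String))) (m : String) :
    pvS (h ++ [p]) m = pvS h m + (if pvCond m p then pvNS p.2 else 0) := by
  by_cases hp : pvCond m p <;> simp [pvS, List.filter_append, hp]

theorem pv_zero_of_not_mem (h : List (String × List (List (String × String)))) (m : String)
    (hm : m ∉ pvMonths h) : pvV h m = 0 ∧ pvS h m = 0 := by
  have : h.filter (pvCond m) = [] := by
    rw [List.filter_eq_nil_iff]
    intro p hp hc
    rcases Bool.and_eq_true_iff.mp hc with ⟨h1, h2⟩
    exact hm (by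
      simp only [pvMonths, List.mem_map]
      exact ⟨p, List.mem_filter.mpr ⟨hp, h1⟩, by simpa using h2⟩)
  constructor <;> simp [pvV, pvS, this]

theorem pv_cond_true (p : String × List (List (String × String))) (hok : 7 ≤ PySem.Str.len p.1) :
    pvCond (pvMonth p.1) p = true := by
  have hok' : 7 ≤ p.1.length := by rw [PySem.Str.len_eq, String.length_toList] at hok; exact_mod_cast hok
  simp [pvCond, hok']

theorem pv_cond_false (p : String × List (List (String × String))) (m : String) (hm : m ≠ pvMonth p.1) :
    pvCond m p = false := by
  simp [pvCond]
  intro _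
  exact fun h => absurd h.symm hm

theorem pv_cond_false_len (p : String × List (List (String × String))) (m : String)
    (hlen : PySem.Str.len p.1 < 7) : pvCond m p = false := by
  rw [PySem.Str.len_eq, String.length_toList] at hlen
  simp [pvCond]
  intro h
  omega

theorem pv_AF_char (h : List (String × List (List (String × String)))) :
    (h.foldl pvAStep PySem.Dict.empty).keys = PySem.Set.ofList (pvMonths h) ∧
    (∀ m, (h.foldl pvAStep PySem.Dict.empty).get? m =
      if m ∈ pvMonths h then some (pvInner h m) else none) := by
  induction h using List.reverseRecOn with
  | nil =>
    constructor
    · simp [pvMonths, PySem.Set.ofList, PySem.Dict.keys_empty]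
    · intro m; simp [pvMonths, PySem.Dict.get?_empty]
  | append_singleton h p ih =>
    obtain ⟨ihk, ihg⟩ := ih
    have hnodup : (h.foldl pvAStep PySem.Dict.empty).keys.Nodup := by
      rw [ihk]; exact PySem.Set.nodup_ofList _
    rw [List.foldl_append, List.foldl_cons, List.foldl_nil]
    by_cases hlen : PySem.Str.len p.1 < 7
    · rw [show pvAStep (h.foldl pvAStep PySem.Dict.empty) p = h.foldl pvAStep PySem.Dict.empty by
        rw [pvAStep, if_pos hlen]]
      have hmon : pvMonths (h ++ [p]) = pvMonths h := by
        rw [pv_months_append, if_neg (by omega), List.append_nil]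
      constructor
      · rw [ihk, hmon]
      · intro m
        rw [ihg m, hmon]
        have hV : pvV (h ++ [p]) m = pvV h m := by
          rw [pv_V_append, pv_cond_false_len p m hlen]; simp
        have hS : pvS (h ++ [p]) m = pvS h m := by
          rw [pv_S_append, pv_cond_false_len p m hlen]; simp
        rw [pvInner, pvInner, hV, hS]
    · have hok : 7 ≤ PySem.Str.len p.1 := by omega
      have hmon : pvMonths (h ++ [p]) = pvMonths h ++ [pvMonth p.1] := by
        rw [pv_months_append, if_pos hok]
      by_cases hmem : pvMonth p.1 ∈ pvMonths h
      · -- month already present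
        have hget : (h.foldl pvAStep PySem.Dict.empty).get? (pvMonth p.1) = some (pvInner h (pvMonth p.1)) := by
          rw [ihg, if_pos hmem]
        have hcont : (h.foldl pvAStep PySem.Dict.empty).contains (pvMonth p.1) = true := by
          rw [PySem.Dict.contains_eq_isSome_get?, hget]; rfl
        have hstep : pvAStep (h.foldl pvAStep PySem.Dict.empty) p
            = (h.foldl pvAStep PySem.Dict.empty).insert (pvMonth p.1)
                (PySem.Dict.mk [("videos", pvV h (pvMonth p.1) + pvNV p.2),
                                ("shorts", pvS h (pvMonth p.1) + pvNS p.2)]) := by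
          have hself := pv_insert_self _ (pvMonth p.1)
            (PySem.Dict.mk [("videos", pvV h (pvMonth p.1)), ("shorts", pvS h (pvMonth p.1))]) hnodup hget
          rw [pvAStep, if_neg (by omega)]
          simp only [hcont, if_pos]
          conv_lhs => rw [← hself]
          exact pv_istep_foldl (pvMonth p.1) p.2 _ _ _
        rw [hstep]
        constructor
        · rw [PySem.Dict.keys_insert_of_contains _ _ hcont, ihk, hmon,
            pv_ofList_append_singleton, if_pos hmem]
        · intro m
          rw [PySem.Dict.get?_insert]
          by_cases hm : m = pvMonth p.1
          · subst hm
            rw [if_pos rfl, if_pos (by rw [hmon]; exact List.mem_append_right _ (List.mem_singleton.mpr rfl))]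
            rw [pvInner, pv_V_append, pv_S_append, pv_cond_true p hok, if_pos rfl, if_pos rfl]
          · rw [if_neg hm, ihg m]
            have hmm : m ∈ pvMonths (h ++ [p]) ↔ m ∈ pvMonths h := by
              rw [hmon]; simp [hm]
            have hV : pvV (h ++ [p]) m = pvV h m := by
              rw [pv_V_append, pv_cond_false p m hm]; simp
            have hS : pvS (h ++ [p]) m = pvS h m := by
              rw [pv_S_append, pv_cond_false p m hm]; simp
            by_cases hmem2 : m ∈ pvMonths h
            · rw [if_pos hmem2, if_pos (hmm.mpr hmem2), pvInner, pvInner, hV, hS]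
            · rw [if_neg hmem2, if_neg (fun hx => hmem2 (hmm.mp hx))]
      · -- fresh month
        have hget : (h.foldl pvAStep PySem.Dict.empty).get? (pvMonth p.1) = none := by
          rw [ihg, if_neg hmem]
        have hcont : (h.foldl pvAStep PySem.Dict.empty).contains (pvMonth p.1) = false := by
          rw [PySem.Dict.contains_eq_isSome_get?, hget]; rfl
        obtain ⟨hV0, hS0⟩ := pv_zero_of_not_mem h (pvMonth p.1) hmem
        have hstep : pvAStep (h.foldl pvAStep PySem.Dict.empty) p
            = (h.foldl pvAStep PySem.Dict.empty).insert (pvMonth p.1)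
                (PySem.Dict.mk [("videos", (0:Int) + pvNV p.2), ("shorts", (0:Int) + pvNS p.2)]) := by
          rw [pvAStep, if_neg (by omega)]
          simp only [hcont, Bool.false_eq_true, if_false]
          exact pv_istep_foldl (pvMonth p.1) p.2 _ 0 0
        rw [hstep]
        constructor
        · rw [PySem.Dict.keys_insert_of_not_contains _ _ hcont, ihk, hmon,
            pv_ofList_append_singleton, if_neg hmem]
        · intro m
          rw [PySem.Dict.get?_insert]
          by_cases hm : m = pvMonth p.1
          · subst hm
            rw [if_pos rfl, if_pos (by rw [hmon]; exact List.mem_append_right _ (List.mem_singleton.mpr rfl))]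
            rw [pvInner, pv_V_append, pv_S_append, pv_cond_true p hok, if_pos rfl, if_pos rfl, hV0, hS0]
          · rw [if_neg hm, ihg m]
            have hmm : m ∈ pvMonths (h ++ [p]) ↔ m ∈ pvMonths h := by
              rw [hmon]; simp [hm]
            have hV : pvV (h ++ [p]) m = pvV h m := by
              rw [pv_V_append, pv_cond_false p m hm]; simp
            have hS : pvS (h ++ [p]) m = pvS h m := by
              rw [pv_S_append, pv_cond_false p m hm]; simp
            by_cases hmem2 : m ∈ pvMonths h
            · rw [if_pos hmem2, if_pos (hmm.mpr hmem2), pvInner, pvInner, hV, hS]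
            · rw [if_neg hmem2, if_neg (fun hx => hmem2 (hmm.mp hx))]

theorem pv_AF_items (h : List (String × List (List (String × String)))) :
    (h.foldl pvAStep PySem.Dict.empty).items
      = (PySem.Set.ofList (pvMonths h)).map (fun m => (m, pvInner h m)) := by
  obtain ⟨hk, hg⟩ := pv_AF_char h
  have hnodup : (h.foldl pvAStep PySem.Dict.empty).keys.Nodup := by
    rw [hk]; exact PySem.Set.nodup_ofList _
  rw [PySem.Dict.items_eq_map_keys _ hnodup (PySem.Dict.mk []), hk]
  apply List.map_congr_left
  intro m hm
  have hm' : m ∈ pvMonths h := (PySem.Set.mem_ofList _ m).mp hm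
  rw [PySem.Dict.getD_eq_get?_getD, hg m, if_pos hm']
  rfl

theorem pv_sorted_map (M : List String) (g : String → String × PySem.Dict String Int)
    (hg : ∀ m, (g m).1 = m) :
    PySem.List.sorted (M.map g) (fun p => p.1) true
      = (PySem.List.sorted M (fun m => m) true).map g := by
  apply List.Perm.eq_of_pairwise (le := fun a b => b.1 ≤ a.1)
  · intro a b ha hb h1 h2
    have ha' : a ∈ M.map g := (PySem.List.sorted_perm _ _ _).mem_iff.mp ha
    have hb' : b ∈ M.map g := by
      rcases List.mem_map.mp hb with ⟨m, hm, rfl⟩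
      exact List.mem_map.mpr ⟨m, (PySem.List.sorted_perm _ _ _).mem_iff.mp hm, rfl⟩
    rcases List.mem_map.mp ha' with ⟨ma, _, rfl⟩
    rcases List.mem_map.mp hb' with ⟨mb, _, rfl⟩
    have : ma = mb := by
      have e := le_antisymm h2 h1
      rwa [hg ma, hg mb] at e
    rw [this]
  · exact PySem.List.sorted_pairwise_rev (M.map g) (fun p => p.1)
  · have := PySem.List.sorted_pairwise_rev M (fun m => m)
    rw [List.pairwise_map]
    exact this.imp (by intro a b hab; simp only [hg]; exact hab)
  · exact (PySem.List.sorted_perm (M.map g) _ _).trans ((PySem.List.sorted_perm M _ _).map g).symm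

theorem pv_A_canon (h : List (String × List (List (String × String)))) :
    get_monthly_breakdown h = pvCanon h := by
  simp only [get_monthly_breakdown]
  rw [pv_AF_items h, pv_sorted_map _ (fun m => (m, pvInner h m)) (fun m => rfl)]
  rw [pvCanon, List.map_map]
  rfl

theorem pv_bfold (hst : List (String × List (List (String × String)))) (m : String) :
    ∀ (vs : Int × Int),
    hst.foldl (fun (vs : Int × Int) p =>
      if decide (7 ≤ PySem.Str.len p.1) && (pvMonth p.1 == m) then
        let s : Int := ((p.2.countP pvIsShorts : Nat) : Int)
        (vs.1 + ((p.2.length : Int) - s), vs.2 + s)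
      else vs) vs = (vs.1 + pvV hst m, vs.2 + pvS hst m) := by
  induction hst with
  | nil => intro vs; simp [pvV, pvS]
  | cons p t ih =>
    intro vs
    rw [List.foldl_cons]
    have hVc : pvV (p :: t) m = (if pvCond m p then pvNV p.2 else 0) + pvV t m := by
      by_cases hc : pvCond m p <;> simp [pvV, List.filter_cons, hc]
    have hSc : pvS (p :: t) m = (if pvCond m p then pvNS p.2 else 0) + pvS t m := by
      by_cases hc : pvCond m p <;> simp [pvS, List.filter_cons, hc]
    by_cases hc : pvCond m p
    · rw [if_pos (show (decide (7 ≤ PySem.Str.len p.1) && (pvMonth p.1 == m)) = true from hc)]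
      rw [ih, hVc, hSc, if_pos hc, if_pos hc]
      simp only [pvNV, pvNS, Prod.ext_iff]
      constructor <;> ring
    · rw [if_neg (show ¬ (decide (7 ≤ PySem.Str.len p.1) && (pvMonth p.1 == m)) = true by
        simpa using (by simpa [pvCond] using hc))]
      rw [ih, hVc, hSc, if_neg hc, if_neg hc, zero_add, zero_add]

theorem pv_B_canon (h : List (String × List (List (String × String)))) :
    get_monthly_breakdown_alt h = pvCanon h := by
  simp only [get_monthly_breakdown_alt]
  have hfun : (fun (result : PySem.Dict String (PySem.Dict String Int)) m =>
      let vs := h.foldl (fun (vs : Int × Int) p =>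
        if decide (7 ≤ PySem.Str.len p.1) && (pvMonth p.1 == m) then
          let s : Int := ((p.2.countP pvIsShorts : Nat) : Int)
          (vs.1 + ((p.2.length : Int) - s), vs.2 + s)
        else vs) ((0 : Int), (0 : Int))
      result.insert m (PySem.Dict.mk [("videos", vs.1), ("shorts", vs.2)]))
      = fun result m => result.insert m (pvInner h m) := by
    funext result m
    rw [pv_bfold h m ((0 : Int), (0 : Int))]
    simp [pvInner]
  rw [hfun]
  have hM : ((h.filter (fun p => decide (7 ≤ PySem.Str.len p.1))).map (fun p => pvMonth p.1)) = pvMonths h := rfl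
  rw [hM]
  have hMnodup : (PySem.List.sorted (PySem.Set.ofList (pvMonths h)) (fun m => m) true).Nodup :=
    ((PySem.List.sorted_perm _ _ _).nodup_iff).mpr (PySem.Set.nodup_ofList _)
  rw [PySem.Dict.items_foldl_insert_fresh _ (fun m => m) (fun m => pvInner h m) PySem.Dict.empty
    (fun a _ => PySem.Dict.contains_empty a) (by simpa using hMnodup)]
  have he : (PySem.Dict.empty : PySem.Dict String (PySem.Dict String Int)).items = [] := rfl
  rw [he, List.nil_append, pvCanon, List.map_map]
  rfl

-- ===== VERDICT (by name: the statement is the Claim_ definition above) =====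
theorem get_monthly_breakdown_spec : Claim_equal_get_monthly_breakdown := by
  intro h _
  unfold Spec_get_monthly_breakdown
  rw [pv_A_canon, pv_B_canon]
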